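-- pv_equiv track=rewrite | github.com/rpandya922/mfi_project | kinova/ik_block_picking.py | get_last_position
-- ===== SOURCE A (Python) =====
-- def get_last_position(d):
--     last_position = None
--     for i in range(len(d)-1, -1, -1):
--         e = d[i]
--         if e is None:
--             continue
--         else:
--             return e
-- ===== SOURCE B (Python) =====
-- def get_last_position(d):
--     result = None
--     for e in d:
--         if e is not None:
--             result = e
--     return result
-- ===== Notes on version B (the rewrite author's own statement) =====
-- stated objective: alternative
-- what changed: B replaces A's backward index scan with early return by a single forward fold that keeps the latest non-None element in an accumulator and returns it after the loop.
import Mathlib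
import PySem

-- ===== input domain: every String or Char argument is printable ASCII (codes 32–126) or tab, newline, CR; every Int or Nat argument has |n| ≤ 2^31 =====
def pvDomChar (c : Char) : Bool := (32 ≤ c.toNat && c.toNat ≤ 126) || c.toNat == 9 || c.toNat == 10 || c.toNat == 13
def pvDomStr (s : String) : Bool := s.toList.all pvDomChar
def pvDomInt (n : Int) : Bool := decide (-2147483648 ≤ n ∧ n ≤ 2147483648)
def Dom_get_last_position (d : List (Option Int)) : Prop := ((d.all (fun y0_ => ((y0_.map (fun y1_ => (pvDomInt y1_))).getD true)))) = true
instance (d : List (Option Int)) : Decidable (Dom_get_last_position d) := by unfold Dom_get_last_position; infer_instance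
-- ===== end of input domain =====

-- B replaces A's backward index scan with early return by a single forward accumulator fold.

-- ===== PORT A =====
-- the 'for i in range(len(d)-1,-1,-1)' loop with early return, as structural recursion over the index list
def getlpLoop (d : List (Option Int)) : List Int → Option Int
  | [] => none
  | i :: rest =>
    match PySem.List.pyGet? d i with
    | none => none            -- IndexError (unreachable: i is in range)
    | some none => getlpLoop d rest     -- continue
    | some (some e) => some e           -- return e

def get_last_position (d : List (Option Int)) : Option Int :=
  getlpLoop d (PySem.List.pyRange ((d.length : Int) - 1) (-1) (-1))

-- ===== PORT B =====
def get_last_position_alt (d : List (Option Int)) : Option Int :=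
  d.foldl (fun result e => match e with | none => result | some v => some v) none

-- ===== PRECONDITION & SPEC =====
def Spec_get_last_position (d : List (Option Int)) (out : Option Int) : Prop := out = get_last_position_alt d
instance (d : List (Option Int)) (out : Option Int) : Decidable (Spec_get_last_position d out) := by unfold Spec_get_last_position; infer_instance

-- ===== CLAIM (what is proved, stated in full; the proofs are below) =====
def Claim_equal_get_last_position : Prop := ∀ (d : List (Option Int)), Dom_get_last_position d → Spec_get_last_position d (get_last_position d)

-- ===== LEMMAS AND PROOFS =====

-- appending an element does not change what the loop reads at in-range indices
theorem getlpLoop_append (xs : List (Option Int)) (x : Option Int) (l : List Int)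
    (h : ∀ i ∈ l, 0 ≤ i ∧ i < (xs.length : Int)) :
    getlpLoop (xs ++ [x]) l = getlpLoop xs l := by
  induction l with
  | nil => rfl
  | cons i rest ih =>
    have hi := h i (List.mem_cons_self)
    have hget : PySem.List.pyGet? (xs ++ [x]) i = PySem.List.pyGet? xs i := by
      rw [PySem.List.pyGet?_of_nonneg (xs ++ [x]) hi.1, PySem.List.pyGet?_of_nonneg xs hi.1]
      have : i.toNat < xs.length := by omega
      rw [List.getElem?_append_left this]
    simp only [getlpLoop, hget]
    cases PySem.List.pyGet? xs i with
    | none => rfl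
    | some e =>
      cases e with
      | none => exact ih (fun j hj => h j (List.mem_cons_of_mem _ hj))
      | some v => rfl

theorem main_eq (d : List (Option Int)) : get_last_position d = get_last_position_alt d := by
  induction d using List.reverseRecOn with
  | nil => rfl
  | append_singleton xs x ih =>
    unfold get_last_position get_last_position_alt
    have hlen : ((xs ++ [x]).length : Int) - 1 = (xs.length : Int) := by
      simp
    rw [hlen, PySem.List.pyRange_neg_one_cons (by omega)]
    have hget : PySem.List.pyGet? (xs ++ [x]) (xs.length : Int) = some x :=
      PySem.List.pyGet?_append_length xs [] x
    simp only [getlpLoop, hget, List.foldl_append, List.foldl_cons, List.foldl_nil]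
    cases x with
    | some v => rfl
    | none =>
      rw [getlpLoop_append xs none _ (fun i hi => by
        rw [PySem.List.mem_pyRange_neg_one] at hi
        omega)]
      exact ih

-- ===== VERDICT (by name: the statement is the Claim_ definition above) =====
theorem get_last_position_spec : Claim_equal_get_last_position := by
  intro d _
  exact main_eq d
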